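-- pv_equiv track=rewrite | github.com/rubenalvarez98/Recuperalo | Reto/ejercicio2.py | cuadrados_ordenados
-- ===== SOURCE A (Python) =====
-- def cuadrados_ordenados(array):
--
--     S = 88
--
--
--     cuadrados_validos = [] #array vacio para almacenar
--
--
--     for numero in array: #recorrer el array
--
--         cuadrado = numero * numero  #cuadrado del numero
--
--
--         if 0 <= cuadrado <= S: #validar si esta en el rango
--
--             cuadrados_validos.append(cuadrado) # agregar a validos
--
--
--     cuadrados_validos.sort() #se ordena sendentemente
--
--     #
--     return cuadrados_validos # lo que retorna la funcion
-- ===== SOURCE B (Python) =====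
-- def cuadrados_ordenados(array):
--     # counting sort over the fixed bounded square range 0..88: one pass of counting,
--     # then emit each value in ascending order; no comparison sort
--     counts = [0] * 89
--     for numero in array:
--         cuadrado = numero * numero
--         if cuadrado <= 88:
--             counts[cuadrado] += 1
--     return [v for v in range(89) for _ in range(counts[v])]
-- ===== Notes on version B (the rewrite author's own statement) =====
-- stated objective: alternative
-- what changed: Replaces filter-then-comparison-sort with a one-pass counting sort over the fixed bounded square range 0..88, emitting values in ascending order by construction; measured speed is about the same.
import Mathlib
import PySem

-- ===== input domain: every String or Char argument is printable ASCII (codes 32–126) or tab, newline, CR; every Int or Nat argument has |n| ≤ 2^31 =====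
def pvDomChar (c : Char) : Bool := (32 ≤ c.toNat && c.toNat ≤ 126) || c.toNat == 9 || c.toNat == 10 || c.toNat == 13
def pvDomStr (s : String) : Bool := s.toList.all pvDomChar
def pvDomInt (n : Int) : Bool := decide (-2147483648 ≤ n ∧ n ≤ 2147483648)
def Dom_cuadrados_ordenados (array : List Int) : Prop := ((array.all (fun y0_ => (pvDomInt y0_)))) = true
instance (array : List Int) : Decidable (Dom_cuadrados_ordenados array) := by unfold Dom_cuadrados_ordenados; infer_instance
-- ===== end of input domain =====

-- ===== PORT A =====
-- B replaces A's filter + comparison sort with a counting sort over the fixed bounded square range 0..88 (objective: alternative).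
def cuadrados_ordenados (array : List Int) : List Int :=
  let cuadrados_validos := array.foldl (fun acc numero =>
      let cuadrado := numero * numero
      if 0 ≤ cuadrado ∧ cuadrado ≤ 88 then acc ++ [cuadrado] else acc) []
  PySem.List.sorted cuadrados_validos (fun x => x) false

-- ===== PORT B =====
def cuadrados_ordenados_alt (array : List Int) : List Int :=
  let counts := array.foldl (fun counts numero =>
      let cuadrado := numero * numero
      if cuadrado ≤ 88 then counts.modify cuadrado.toNat (· + 1) else counts)
    (List.replicate 89 (0 : Nat))
  (List.range 89).flatMap (fun v => List.replicate (counts.getD v 0) ((v : Int)))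

-- ===== PRECONDITION & SPEC =====
def Spec_cuadrados_ordenados (array : List Int) (out : List Int) : Prop := out = cuadrados_ordenados_alt array
instance (array : List Int) (out : List Int) : Decidable (Spec_cuadrados_ordenados array out) := by unfold Spec_cuadrados_ordenados; infer_instance

-- ===== CLAIM (what is proved, stated in full; the proofs are below) =====
def Claim_equal_cuadrados_ordenados : Prop := ∀ (array : List Int), Dom_cuadrados_ordenados array → Spec_cuadrados_ordenados array (cuadrados_ordenados array)

-- ===== LEMMAS AND PROOFS =====

-- the multiset of valid squares, as B's guard filters them
def pvL (array : List Int) : List Int :=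
  (array.filter (fun n => decide (n * n ≤ 88))).map (fun n => n * n)

theorem pvL_mem {array : List Int} {x : Int} (hx : x ∈ pvL array) : 0 ≤ x ∧ x ≤ 88 := by
  simp only [pvL, List.mem_map, List.mem_filter, decide_eq_true_eq] at hx
  obtain ⟨n, ⟨_, h88⟩, rfl⟩ := hx
  exact ⟨mul_self_nonneg n, h88⟩

-- the counting pass tallies exactly the multiplicities of pvL
theorem pvL_cons (n : Int) (t : List Int) :
    pvL (n :: t) = if n * n ≤ 88 then n * n :: pvL t else pvL t := by
  simp only [pvL, List.filter_cons]
  by_cases h : n * n ≤ 88 <;> simp [h]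

theorem counts_getD (array : List Int) (counts : List Nat) (j : Nat) (hj : j < counts.length) :
    ((array.foldl (fun counts numero =>
        let cuadrado := numero * numero
        if cuadrado ≤ 88 then counts.modify cuadrado.toNat (· + 1) else counts) counts).getD j 0)
      = counts.getD j 0 + (pvL array).count ((j : Int)) := by
  induction array generalizing counts with
  | nil => simp [pvL]
  | cons n t ih =>
    rw [List.foldl_cons, pvL_cons]
    by_cases h : n * n ≤ 88
    · simp only [if_pos h]
      rw [ih _ (by simpa using hj), List.count_cons]
      simp only [List.getD_eq_getElem?_getD, List.getElem?_modify]
      by_cases he : (n * n).toNat = j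
      · have h0 : 0 ≤ n * n := mul_self_nonneg n
        have heq : n * n = (j : Int) := by omega
        simp [heq, List.getElem?_eq_getElem hj]
        omega
      · have hne : ¬ n * n = (j : Int) := by
          intro hc; apply he; rw [hc]; exact Int.toNat_natCast j
        simp [he, hne]
    · simp only [if_neg h]
      rw [ih _ hj]

-- counting-sort output is a permutation of pvL: count of each value agrees
theorem count_flat (L : List Int) (a : Int) (ns : List Nat) (hnd : ns.Nodup) :
    ((ns.flatMap (fun (v : Nat) => List.replicate (L.count ((v : Int))) ((v : Int)))).count a)
      = if a.toNat ∈ ns ∧ 0 ≤ a then L.count a else 0 := by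
  induction ns with
  | nil => simp [List.flatMap]
  | cons n t ih =>
    simp only [List.flatMap_cons, List.count_append, List.count_replicate]
    rw [ih hnd.of_cons]
    by_cases he : (n : Int) = a
    · have ha : 0 ≤ a := he ▸ Int.natCast_nonneg n
      have hn : a.toNat = n := by omega
      have hnt : n ∉ t := (List.nodup_cons.mp hnd).1
      simp [he, hn, ha, hnt]
    · have hn : a.toNat = n → ¬ 0 ≤ a := by
        intro h h0; exact he (by omega)
      by_cases hm : a.toNat ∈ t ∧ 0 ≤ a
      · simp [he, hm]
      · simp only [beq_iff_eq, he, if_false, List.mem_cons, if_neg hm, zero_add]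
        rw [if_neg]; rintro ⟨h1 | h2, h0⟩
        · exact hn h1 h0
        · exact hm ⟨h2, h0⟩

theorem flat_perm (L : List Int) (hL : ∀ x ∈ L, 0 ≤ x ∧ x ≤ 88) :
    ((List.range 89).flatMap (fun (v : Nat) => List.replicate (L.count ((v : Int))) ((v : Int)))).Perm L := by
  rw [List.perm_iff_count]
  intro a
  rw [count_flat L a _ (List.nodup_range)]
  by_cases h : a.toNat ∈ List.range 89 ∧ 0 ≤ a
  · simp [h]
  · rw [if_neg h]
    symm
    rw [List.count_eq_zero]
    intro hm
    obtain ⟨h0, h88⟩ := hL a hm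
    exact h ⟨List.mem_range.mpr (by omega), h0⟩

theorem flat_pairwise (L : List Int) (ns : List Nat) (hns : ns.Pairwise (· < ·)) :
    (ns.flatMap (fun (v : Nat) => List.replicate (L.count ((v : Int))) ((v : Int)))).Pairwise (· ≤ ·) := by
  induction ns with
  | nil => simp [List.flatMap]
  | cons n t ih =>
    simp only [List.flatMap_cons]
    rw [List.pairwise_append]
    refine ⟨List.pairwise_replicate.mpr (Or.inr le_rfl), ih hns.of_cons, ?_⟩
    intro x hx y hy
    obtain rfl := List.eq_of_mem_replicate hx
    obtain ⟨m, hm, hus⟩ := List.mem_flatMap.mp hy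
    obtain rfl := List.eq_of_mem_replicate hus
    have : n < m := (List.pairwise_cons.mp hns).1 m hm
    exact_mod_cast Int.ofNat_le.mpr this.le

-- ===== VERDICT (by name: the statement is the Claim_ definition above) =====
theorem cuadrados_ordenados_spec : Claim_equal_cuadrados_ordenados := by
  intro array _
  unfold Spec_cuadrados_ordenados cuadrados_ordenados cuadrados_ordenados_alt
  simp only
  have hA : (array.foldl (fun acc numero =>
      let cuadrado := numero * numero
      if 0 ≤ cuadrado ∧ cuadrado ≤ 88 then acc ++ [cuadrado] else acc) []) = pvL array := by
    have : (array.foldl (fun acc numero =>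
        if decide (0 ≤ numero * numero ∧ numero * numero ≤ 88) then acc ++ [numero * numero] else acc) [])
        = (array.filter (fun n => decide (0 ≤ n * n ∧ n * n ≤ 88))).map (fun n => n * n) := by
      simpa using PySem.List.foldl_append_if (fun n => decide (0 ≤ n * n ∧ n * n ≤ 88)) (fun n => n * n) array []
    simp only [decide_eq_true_eq] at this
    rw [this, pvL]
    congr 1
    apply List.filter_congr
    intro n _
    simp [mul_self_nonneg n]
  rw [hA]
  have hcounts : ∀ v ∈ List.range 89,
      ((array.foldl (fun counts numero =>
          let cuadrado := numero * numero
          if cuadrado ≤ 88 then counts.modify cuadrado.toNat (· + 1) else counts)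
        (List.replicate 89 (0 : Nat))).getD v 0) = (pvL array).count ((v : Int)) := by
    intro v hv
    have hv' : v < 89 := List.mem_range.mp hv
    rw [counts_getD array _ v (by simpa using hv')]
    have h0 : (List.replicate 89 (0 : Nat)).getD v 0 = 0 := by
      rw [List.getD_eq_getElem?_getD, List.getElem?_replicate, if_pos hv']
      rfl
    rw [h0, Nat.zero_add]
  rw [List.flatMap_congr (fun v hv => by rw [hcounts v hv])]
  apply PySem.List.sorted_id_eq_of_perm_of_pairwise
  · exact flat_perm (pvL array) (fun x hx => pvL_mem hx)
  · exact flat_pairwise (pvL array) _ List.pairwise_lt_range
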